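-- pv_equiv track=rewrite | github.com/mwildehahn/pydantic-ai-gepa | src/pydantic_ai_gepa/tool_components.py | _format_path
-- ===== SOURCE A (Python) =====
-- def _format_path(path: tuple[str, ...]) -> str:
--     formatted: list[str] = []
--     for segment in path:
--         if segment == "[]":
--             if not formatted:
--                 formatted.append("[]")
--             else:
--                 formatted[-1] = f"{formatted[-1]}[]"
--         else:
--             formatted.append(segment)
--     return ".".join(formatted)
-- ===== SOURCE B (Python) =====
-- def _format_path(path: tuple[str, ...]) -> str:
--     result = ""
--     started = False
--     for segment in path:
--         if segment == "[]":
--             result += "[]"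
--             started = True
--         elif started:
--             result += "." + segment
--         else:
--             result = segment
--             started = True
--     return result
-- ===== Notes on version B (the rewrite author's own statement) =====
-- stated objective: alternative
-- what changed: B drops A's group list entirely (no append/last-element mutation, no '.'-join): it keeps a single running string plus a 'started' flag, appending '[]' directly or '.'+segment as it goes.
import Mathlib
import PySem

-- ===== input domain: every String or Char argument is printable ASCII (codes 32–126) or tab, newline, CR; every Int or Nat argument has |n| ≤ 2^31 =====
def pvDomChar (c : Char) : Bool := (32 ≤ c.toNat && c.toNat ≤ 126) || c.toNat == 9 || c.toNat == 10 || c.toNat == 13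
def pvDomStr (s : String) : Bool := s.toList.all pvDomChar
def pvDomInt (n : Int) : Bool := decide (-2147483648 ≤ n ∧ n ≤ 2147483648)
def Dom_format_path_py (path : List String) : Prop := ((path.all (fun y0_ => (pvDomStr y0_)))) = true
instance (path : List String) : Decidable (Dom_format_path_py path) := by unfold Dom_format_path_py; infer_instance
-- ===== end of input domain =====

-- B replaces A's group list (append / in-place mutation of the last element / '.'-join)
-- by a single running string with a 'started' flag ('alternative': no list, no join).

-- ===== PORT A =====
-- loop body of A: '[]' merges into the previous group (formatted[-1] = formatted[-1] + "[]"),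
-- anything else starts a new group
def fpA_step (formatted : List String) (segment : String) : List String :=
  if segment = "[]" then
    if formatted = [] then formatted ++ ["[]"]
    else formatted.dropLast ++ [formatted.getLast! ++ "[]"]
  else formatted ++ [segment]

def format_path_py (path : List String) : String :=
  PySem.Str.join "." (path.foldl fpA_step [])

-- ===== PORT B =====
-- loop body of B; the running string is kept as List Char (exact model of Python str concat)
def fpB_step (st : List Char × Bool) (segment : String) : List Char × Bool :=
  if segment = "[]" then (st.1 ++ "[]".toList, true)
  else if st.2 then (st.1 ++ '.' :: segment.toList, true)
  else (segment.toList, true)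

def format_path_py_alt (path : List String) : String :=
  String.ofList (path.foldl fpB_step ([], false)).1

-- ===== PRECONDITION & SPEC =====
def Spec_format_path_py (path : List String) (out : String) : Prop := out = format_path_py_alt path
instance (path : List String) (out : String) : Decidable (Spec_format_path_py path out) := by unfold Spec_format_path_py; infer_instance

-- ===== CLAIM (what is proved, stated in full; the proofs are below) =====
def Claim_equal_format_path_py : Prop := ∀ (path : List String), Dom_format_path_py path → Spec_format_path_py path (format_path_py path)

-- ===== LEMMAS AND PROOFS =====

lemma joinC_snoc (sep : List Char) (l : List (List Char)) (x : List Char) :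
    PySem.Chars.join sep (l ++ [x])
      = PySem.Chars.join sep l ++ (if l = [] then [] else sep) ++ x := by
  induction l with
  | nil => simp [PySem.Chars.join_singleton, PySem.Chars.join_nil]
  | cons a t ih =>
    cases t with
    | nil =>
      simp [PySem.Chars.join_cons_cons, PySem.Chars.join_singleton]
    | cons b t' =>
      simp only [List.cons_append] at ih ⊢
      rw [PySem.Chars.join_cons_cons, ih, PySem.Chars.join_cons_cons]
      simp

lemma fpA_mod (sep : List Char) (l : List String) (h : l ≠ []) (e : String) :
    PySem.Chars.join sep ((l.dropLast ++ [l.getLast! ++ e]).map String.toList)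
      = PySem.Chars.join sep (l.map String.toList) ++ e.toList := by
  have hl : l.dropLast ++ [l.getLast h] = l := List.dropLast_concat_getLast h
  have hgl : l.getLast! = l.getLast h := by
    cases l with
    | nil => exact absurd rfl h
    | cons a as => rfl
  conv_rhs => rw [← hl]
  rw [hgl]
  simp only [List.map_append, List.map_cons, List.map_nil, String.toList_append]
  rw [joinC_snoc, joinC_snoc]
  simp

-- invariant: B's state is (the '.'-join of A's group list, "A's list is nonempty")
lemma fp_main : ∀ (path : List String) (a : List String),
    path.foldl fpB_step (PySem.Chars.join ("." : String).toList (a.map String.toList), !a.isEmpty)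
      = (PySem.Chars.join ("." : String).toList ((path.foldl fpA_step a).map String.toList),
         !(path.foldl fpA_step a).isEmpty) := by
  intro path
  induction path with
  | nil => intro a; rfl
  | cons s rest ih =>
    intro a
    simp only [List.foldl_cons]
    have hstep : fpB_step (PySem.Chars.join ("." : String).toList (a.map String.toList), !a.isEmpty) s
        = (PySem.Chars.join ("." : String).toList ((fpA_step a s).map String.toList), !(fpA_step a s).isEmpty) := by
      by_cases hs : s = "[]"
      · by_cases ha : a = []
        · subst ha hs
          simp [fpA_step, fpB_step, PySem.Chars.join_singleton, PySem.Chars.join_nil]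
        · have hA : fpA_step a s = a.dropLast ++ [a.getLast! ++ "[]"] := by
            simp [fpA_step, hs, ha]
          have hne : a.dropLast ++ [a.getLast! ++ "[]"] ≠ [] := by simp
          rw [hA, fpA_mod _ a ha]
          simp [fpB_step, hs]
      · have hA : fpA_step a s = a ++ [s] := by simp [fpA_step, hs]
        by_cases ha : a = []
        · subst ha
          simp [hA, fpB_step, hs, PySem.Chars.join_singleton]
        · have ha' : (a.map String.toList) ≠ [] := by simpa using ha
          rw [hA]
          simp only [List.map_append, List.map_cons, List.map_nil]
          rw [joinC_snoc]
          simp [fpB_step, hs, ha, ha']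
    rw [hstep, ih]
-- ===== VERDICT (by name: the statement is the Claim_ definition above) =====
theorem format_path_py_spec : Claim_equal_format_path_py := by
  intro path _
  unfold Spec_format_path_py format_path_py format_path_py_alt PySem.Str.join
  have h := fp_main path []
  simp only [List.map_nil, PySem.Chars.join_nil, List.isEmpty_nil, Bool.not_true] at h
  rw [h]
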